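-- pv_equiv track=rewrite | github.com/Flying-Angels/Mahjong | Code/Rule.py | kokushimusoJudge
-- ===== SOURCE A (Python) =====
-- import copy
--
-- def kokushimusoJudge(hands):
--     handscopy = copy.deepcopy(hands)
--     yaolist = ["1m", "9m", "1p", "9p", "1s", "9s", "d1", "d2", "d3", "f1", "f2", "f3", "f4"]
--     for i in yaolist:
--         if i in handscopy:
--             handscopy.remove(i)
--     if len(handscopy) == 1 and handscopy[0] in yaolist:
--         return True
--     else:
--         return False
-- ===== SOURCE B (Python) =====
-- def kokushimusoJudge(hands):
--     yao = {"1m", "9m", "1p", "9p", "1s", "9s", "d1", "d2", "d3", "f1", "f2", "f3", "f4"}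
--     return all(t in yao for t in hands) and len(hands) - len(set(hands)) == 1
-- ===== Notes on version B (the rewrite author's own statement) =====
-- stated objective: simpler
-- what changed: Replaced the deepcopy plus per-yao-tile remove loop and leftover inspection by a single membership pass over the hand plus a duplicate count (len(hands) - len(set(hands)) == 1).
import Mathlib
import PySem

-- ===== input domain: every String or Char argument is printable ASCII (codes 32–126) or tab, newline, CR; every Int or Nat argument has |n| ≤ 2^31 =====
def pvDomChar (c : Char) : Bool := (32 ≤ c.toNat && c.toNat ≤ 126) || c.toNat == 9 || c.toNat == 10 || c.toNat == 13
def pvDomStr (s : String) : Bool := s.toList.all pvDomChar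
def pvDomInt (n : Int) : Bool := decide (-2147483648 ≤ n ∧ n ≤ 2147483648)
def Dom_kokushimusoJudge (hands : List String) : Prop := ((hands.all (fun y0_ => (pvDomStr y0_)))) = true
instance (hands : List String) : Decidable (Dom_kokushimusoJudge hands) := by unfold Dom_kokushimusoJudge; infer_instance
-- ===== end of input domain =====

-- B replaces A's deepcopy + per-yao remove loop by one membership pass plus a duplicate count (simpler, one pass over the hand).

-- ===== PORT A =====
def pvYaolist : List String :=
  ["1m", "9m", "1p", "9p", "1s", "9s", "d1", "d2", "d3", "f1", "f2", "f3", "f4"]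

def kokushimusoJudge (hands : List String) : Bool :=
  -- handscopy = copy.deepcopy(hands); for i in yaolist: if i in handscopy: handscopy.remove(i)
  let handscopy :=
    pvYaolist.foldl (fun hs i =>
      if hs.contains i then (PySem.List.remove? hs i).getD hs else hs) hands
  -- if len(handscopy) == 1 and handscopy[0] in yaolist (index only reached when len == 1, never raises)
  if handscopy.length == 1 &&
      (match PySem.List.pyGet? handscopy 0 with
       | some t => pvYaolist.contains t
       | none => false) then
    true
  else
    false

-- ===== PORT B =====
def kokushimusoJudge_alt (hands : List String) : Bool :=
  let yao : PySem.Set String :=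
    PySem.Set.ofList ["1m", "9m", "1p", "9p", "1s", "9s", "d1", "d2", "d3", "f1", "f2", "f3", "f4"]
  hands.all (fun t => PySem.Set.contains yao t) &&
    decide ((hands.length : Int) - ((PySem.Set.ofList hands).length : Int) = 1)

-- ===== PRECONDITION & SPEC =====
def Spec_kokushimusoJudge (hands : List String) (out : Bool) : Prop := out = kokushimusoJudge_alt hands
instance (hands : List String) (out : Bool) : Decidable (Spec_kokushimusoJudge hands out) := by unfold Spec_kokushimusoJudge; infer_instance

-- ===== CLAIM (what is proved, stated in full; the proofs are below) =====
def Claim_equal_kokushimusoJudge : Prop := ∀ (hands : List String), Dom_kokushimusoJudge hands → Spec_kokushimusoJudge hands (kokushimusoJudge hands)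

-- ===== LEMMAS AND PROOFS =====

-- A's loop body is exactly List.erase.
theorem pv_step_eq_erase (hs : List String) (i : String) :
    (if hs.contains i then (PySem.List.remove? hs i).getD hs else hs) = hs.erase i := by
  by_cases h : i ∈ hs
  · simp [h, PySem.List.remove?_eq_some_erase hs i h]
  · simp [h, List.erase_of_not_mem h]

-- A's whole loop is List.diff.
theorem pv_fold_eq_diff (hands : List String) :
    pvYaolist.foldl (fun hs i =>
      if hs.contains i then (PySem.List.remove? hs i).getD hs else hs) hands
      = hands.diff pvYaolist := by
  rw [List.diff_eq_foldl]
  exact PySem.List.foldl_congr_mem pvYaolist _ _ hands (fun acc x _ => pv_step_eq_erase acc x)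

-- number of distinct elements of l lying in ys
def pvS (l ys : List String) : Nat := (PySem.List.dedup l).countP (fun x => decide (x ∈ ys))

theorem pv_countP_congr_mem {l1 l2 : List String} (h1 : l1.Nodup) (h2 : l2.Nodup)
    (p : String → Bool) (h : ∀ x, p x = true → (x ∈ l1 ↔ x ∈ l2)) :
    l1.countP p = l2.countP p := by
  have hperm : (l1.filter p).Perm (l2.filter p) := by
    refine (List.perm_ext_iff_of_nodup (h1.filter p) (h2.filter p)).2 ?_
    intro x
    simp only [List.mem_filter]
    constructor
    · rintro ⟨hm, hp⟩; exact ⟨(h x hp).1 hm, hp⟩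
    · rintro ⟨hm, hp⟩; exact ⟨(h x hp).2 hm, hp⟩
  simpa [List.countP_eq_length_filter] using hperm.length_eq

theorem pv_countP_mem_cons (d : List String) (y : String) (ys : List String)
    (hd : d.Nodup) (hyd : y ∈ d) (hyys : y ∉ ys) :
    d.countP (fun x => decide (x ∈ y :: ys)) = d.countP (fun x => decide (x ∈ ys)) + 1 := by
  induction d with
  | nil => cases hyd
  | cons a d ih =>
    rcases List.nodup_cons.1 hd with ⟨had, hd'⟩
    by_cases hay : a = y
    · subst hay
      have hcongr : List.countP (fun x => decide (x ∈ a :: ys)) d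
          = List.countP (fun x => decide (x ∈ ys)) d := by
        refine List.countP_congr ?_
        intro x hx
        have hxa : x ≠ a := fun h => had (h ▸ hx)
        simp [hxa]
      rw [List.countP_cons, List.countP_cons, hcongr]
      simp [hyys]
    · have hyd' : y ∈ d := by
        rcases List.mem_cons.1 hyd with h | h
        · exact absurd h.symm hay
        · exact h
      rw [List.countP_cons, List.countP_cons, ih hd' hyd']
      by_cases haa : a ∈ ys <;> simp [haa, hay]

theorem pv_foldl_add_len (l : List String) : ∀ s : List String,
    (List.foldl PySem.Set.add s l).length ≤ s.length + l.length := by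
  induction l with
  | nil => intro s; simp
  | cons a l ih =>
    intro s
    have h1 : (PySem.Set.add s a).length ≤ s.length + 1 := by
      by_cases h : a ∈ s <;> simp [PySem.Set.add, h]
    calc (List.foldl PySem.Set.add s (a :: l)).length
        = (List.foldl PySem.Set.add (PySem.Set.add s a) l).length := rfl
      _ ≤ (PySem.Set.add s a).length + l.length := ih _
      _ ≤ s.length + (a :: l).length := by simp; omega

theorem pv_dedup_len_le (l : List String) : (PySem.List.dedup l).length ≤ l.length := by
  rw [PySem.List.dedup_eq_ofList, PySem.Set.ofList_eq_foldl]
  simpa using pv_foldl_add_len l []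

theorem pv_length_diff (ys : List String) (hys : ys.Nodup) (l : List String) :
    (l.diff ys).length = l.length - pvS l ys := by
  induction ys generalizing l with
  | nil => simp [pvS]
  | cons y ys ih =>
    rcases List.nodup_cons.1 hys with ⟨hy, hys'⟩
    by_cases hmem : y ∈ l
    · have hyd : y ∈ PySem.List.dedup l := (PySem.List.mem_dedup l y).2 hmem
      have hlen : (l.erase y).length = l.length - 1 := List.length_erase_of_mem hmem
      have hsplit : pvS l (y :: ys) = pvS l ys + 1 :=
        pv_countP_mem_cons _ y ys (PySem.List.nodup_dedup l) hyd hy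
      have heq : pvS (l.erase y) ys = pvS l ys := by
        unfold pvS
        refine pv_countP_congr_mem (PySem.List.nodup_dedup _) (PySem.List.nodup_dedup _) _ ?_
        intro x hp
        have hxy : x ≠ y := by
          intro h; subst h; exact hy (by simpa using hp)
        rw [PySem.List.mem_dedup, PySem.List.mem_dedup]
        exact List.mem_erase_of_ne hxy
      have hge : 1 ≤ pvS l (y :: ys) := by
        have : 0 < pvS l (y :: ys) := by
          unfold pvS
          exact List.countP_pos_iff.2 ⟨y, hyd, by simp⟩
        omega
      have hle : pvS l (y :: ys) ≤ l.length := by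
        unfold pvS
        calc (PySem.List.dedup l).countP _ ≤ (PySem.List.dedup l).length := List.countP_le_length
          _ ≤ l.length := pv_dedup_len_le l
      calc (l.diff (y :: ys)).length = ((l.erase y).diff ys).length := by
            rw [List.diff_cons]
        _ = (l.erase y).length - pvS (l.erase y) ys := ih hys' _
        _ = l.length - pvS l (y :: ys) := by omega
    · have herase : l.erase y = l := List.erase_of_not_mem hmem
      have hS : pvS l (y :: ys) = pvS l ys := by
        unfold pvS
        refine List.countP_congr ?_
        intro x hx
        have hxy : x ≠ y := by
          intro h; subst h
          exact hmem ((PySem.List.mem_dedup l x).1 hx)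
        by_cases hxm : x ∈ ys <;> simp [hxm, hxy]
      rw [List.diff_cons, herase, ih hys' l, hS]

theorem pv_yaolist_nodup : pvYaolist.Nodup := by decide

-- when every tile is a yao tile, pvS counts all distinct tiles
theorem pv_pvS_of_all (l : List String) (h : ∀ t ∈ l, t ∈ pvYaolist) :
    pvS l pvYaolist = (PySem.List.dedup l).length := by
  unfold pvS
  rw [List.countP_eq_length]
  intro x hx
  exact decide_eq_true (h x ((PySem.List.mem_dedup l x).1 hx))

-- ===== VERDICT (by name: the statement is the Claim_ definition above) =====
theorem kokushimusoJudge_spec : Claim_equal_kokushimusoJudge := by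
  intro hands _hdom
  unfold Spec_kokushimusoJudge
  have hof : (PySem.Set.ofList ["1m", "9m", "1p", "9p", "1s", "9s", "d1", "d2", "d3", "f1", "f2", "f3", "f4"] : List String) = pvYaolist := by decide
  have hset : (PySem.Set.ofList hands : List String) = PySem.List.dedup hands :=
    (PySem.List.dedup_eq_ofList hands).symm
  have hdle : (PySem.List.dedup hands).length ≤ hands.length := pv_dedup_len_le hands
  simp only [kokushimusoJudge, kokushimusoJudge_alt, pv_fold_eq_diff, hof,
    PySem.Set.contains_eq_listContains]
  by_cases hall : ∀ t ∈ hands, t ∈ pvYaolist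
  · have hlen : (hands.diff pvYaolist).length = hands.length - (PySem.List.dedup hands).length := by
      rw [pv_length_diff _ pv_yaolist_nodup, pv_pvS_of_all _ hall]
    by_cases hone : hands.length - (PySem.List.dedup hands).length = 1
    · rcases List.length_eq_one_iff.1 (hlen.trans hone) with ⟨t, ht⟩
      have htm : t ∈ hands := List.diff_subset _ _ (ht ▸ List.mem_singleton_self t)
      have hint : ((hands.length : Int) - ((List.length (PySem.Set.ofList hands)) : Int) = 1) := by
        rw [hset]; omega
      simp [ht, List.all_eq_true, hall t htm, hint]
      exact hall
    · have hA : ((hands.diff pvYaolist).length == 1) = false := by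
        rw [hlen]
        exact beq_eq_false_iff_ne.mpr hone
      have hint : ¬ ((hands.length : Int) - ((List.length (PySem.Set.ofList hands)) : Int) = 1) := by
        rw [hset]; omega
      simp [hA, hint]
  · push_neg at hall
    rcases hall with ⟨t, htm, hty⟩
    have hfalse : ¬ ∀ x ∈ hands, x ∈ pvYaolist := fun h => hty (h t htm)
    have htd : t ∈ hands.diff pvYaolist := List.mem_diff_of_mem htm hty
    by_cases hone : (hands.diff pvYaolist).length = 1
    · rcases List.length_eq_one_iff.1 hone with ⟨u, hu⟩
      have htu : t = u := by simpa [hu] using htd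
      subst htu
      simp [hu, hty, List.all_eq_true, hfalse]
    · have hA : ((hands.diff pvYaolist).length == 1) = false := beq_eq_false_iff_ne.mpr hone
      simp [hA, List.all_eq_true, hfalse]
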